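-- pv_equiv track=rewrite | github.com/acoustic0422/problem_solve | Programmers/210507/후보키.py | check_tuple
-- ===== SOURCE A (Python) =====
-- def check_tuple(relation, comb):
--     check = set()
--     for col in relation:
--         temp = ''
--         for i in comb:
--             temp += col[i]
--         if temp not in check:
--             check.add(temp)
--         else:
--             return False
--     return True
-- ===== SOURCE B (Python) =====
-- def check_tuple(relation, comb):
--     sorted_keys = []
--     for col in relation:
--         key = ''.join(col[i] for i in comb)
--         lo, hi = 0, len(sorted_keys)
--         while lo < hi:
--             mid = (lo + hi) // 2
--             if sorted_keys[mid] < key: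
--                 lo = mid + 1
--             else:
--                 hi = mid
--         if lo < len(sorted_keys) and sorted_keys[lo] == key:
--             return False
--         sorted_keys.insert(lo, key)
--     return True
-- ===== Notes on version B (the rewrite author's own statement) =====
-- stated objective: alternative
-- what changed: B replaces A's hash set with a sorted list of keys maintained by hand-written binary search (bisect-style lower bound) and positional insert, detecting a duplicate when the found slot holds an equal key; the per-row early exit is kept so exception behaviour matches A.
-- outside the precondition, e.g. on check_tuple([['a'], ['a'], []], [0]): A returns False, B returns False
import Mathlib
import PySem

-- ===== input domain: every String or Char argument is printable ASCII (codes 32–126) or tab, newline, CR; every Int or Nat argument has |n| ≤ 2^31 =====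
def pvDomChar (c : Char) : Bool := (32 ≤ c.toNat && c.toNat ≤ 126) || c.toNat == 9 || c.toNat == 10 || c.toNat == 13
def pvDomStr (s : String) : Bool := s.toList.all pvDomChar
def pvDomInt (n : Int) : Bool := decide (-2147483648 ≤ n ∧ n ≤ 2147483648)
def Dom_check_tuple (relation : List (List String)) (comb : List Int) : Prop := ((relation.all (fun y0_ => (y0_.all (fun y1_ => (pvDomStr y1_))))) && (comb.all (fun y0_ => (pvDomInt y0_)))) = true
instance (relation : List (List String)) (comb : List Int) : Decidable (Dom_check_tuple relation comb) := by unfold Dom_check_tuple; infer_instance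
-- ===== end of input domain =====

-- B keeps A's row-by-row scan with early exit but replaces the hash set by a sorted key list maintained with a hand-written binary search and positional insert; same results, a different data structure.


-- ===== PORT A =====
-- temp = ''; for i in comb: temp += col[i]   (none propagates an IndexError; excluded by Pre_)
def buildTemp (col : List String) (comb : List Int) : Option String :=
  comb.foldl (fun acc i => acc.bind (fun t => (PySem.List.pyGet? col i).map (fun s => t ++ s))) (some "")

-- the for-loop over relation with the running set `check` and the early `return False`
def aLoop (comb : List Int) : List (List String) → PySem.Set String → Bool
  | [], _ => true
  | col :: rest, check =>
    match buildTemp col comb with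
    | none => false   -- IndexError here; outside Pre_
    | some temp =>
      if PySem.Set.contains check temp then false
      else aLoop comb rest (PySem.Set.add check temp)

def check_tuple (relation : List (List String)) (comb : List Int) : Bool :=
  aLoop comb relation PySem.Set.empty

-- ===== PORT B =====
-- key = ''.join(col[i] for i in comb): collect the parts (none = IndexError), then concatenate
def joinKey (col : List String) (comb : List Int) : Option String :=
  (comb.mapM (fun i => PySem.List.pyGet? col i)).map (fun parts => parts.foldl (· ++ ·) "")

-- the while-loop 'while lo < hi: mid = (lo+hi)//2; …'; sorted_keys[mid] is always in range (lo ≤ mid < hi ≤ len), so getD is exact there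
def bsearch (sk : List String) (key : String) (lo hi : Nat) : Nat :=
  if _h : lo < hi then
    let mid := (lo + hi) / 2
    if sk.getD mid "" < key then bsearch sk key (mid + 1) hi
    else bsearch sk key lo mid
  else lo
termination_by hi - lo
decreasing_by all_goals omega

-- the for-loop over relation carrying the sorted key list, with the early `return False`
def bLoop (comb : List Int) : List (List String) → List String → Bool
  | [], _ => true
  | col :: rest, sk =>
    match joinKey col comb with
    | none => false   -- IndexError here; outside Pre_
    | some key =>
      let lo := bsearch sk key 0 sk.length
      if lo < sk.length && sk.getD lo "" == key then false   -- sorted_keys[lo] in range under the && guard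
      else bLoop comb rest (PySem.List.insert sk (lo : Int) key)

def check_tuple_alt (relation : List (List String)) (comb : List Int) : Bool :=
  bLoop comb relation []

-- ===== PRECONDITION & SPEC =====
-- Pre_ excludes inputs where some comb index is out of range for some row: on those A raises
-- IndexError (and B raises identically) — except when an earlier duplicate row makes both
-- return False before reaching the bad row, a degenerate corner where A and B still agree
-- (see claim cite); Pre_ is this slightly conservative closed form. (Both ports model an
-- IndexError row as `false` at the same point, so the ports agree even outside Pre_ and the
-- proof below does not need the Pre_ hypothesis; Pre_ delimits where the PYTHONS return.)
def Pre_check_tuple (relation : List (List String)) (comb : List Int) : Prop :=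
  ∀ col ∈ relation, ∀ i ∈ comb, PySem.Raise.InRange col.length i
instance (relation : List (List String)) (comb : List Int) : Decidable (Pre_check_tuple relation comb) := by unfold Pre_check_tuple; infer_instance

def pvWitness_check_tuple : List (List String) × List Int := ([["a", "b"], ["a", "c"]], [0, 1])

def Spec_check_tuple (relation : List (List String)) (comb : List Int) (out : Bool) : Prop := out = check_tuple_alt relation comb
instance (relation : List (List String)) (comb : List Int) (out : Bool) : Decidable (Spec_check_tuple relation comb out) := by unfold Spec_check_tuple; infer_instance

-- ===== CLAIM (what is proved, stated in full; the proofs are below) =====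
def Claim_equal_check_tuple : Prop := ∀ (relation : List (List String)) (comb : List Int), Dom_check_tuple relation comb → Pre_check_tuple relation comb → Spec_check_tuple relation comb (check_tuple relation comb)

-- ===== LEMMAS AND PROOFS =====

-- keys agree: A's += fold and B's join over collected parts build the same string
lemma buildTemp_eq_joinKey (col : List String) (comb : List Int) :
    buildTemp col comb = joinKey col comb := by
  suffices h : ∀ (l : List Int) (t : String),
      l.foldl (fun acc i => acc.bind (fun t => (PySem.List.pyGet? col i).map (fun s => t ++ s))) (some t)
        = (l.mapM (fun i => PySem.List.pyGet? col i)).map (fun parts => parts.foldl (· ++ ·) t) by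
    simpa [buildTemp, joinKey] using h comb ""
  intro l
  induction l with
  | nil => intro t; simp
  | cons i rest ih =>
    intro t
    cases hg : PySem.List.pyGet? col i with
    | none =>
      simp [List.foldl_cons, hg, List.mapM_cons]
      clear ih
      induction rest with
      | nil => simp
      | cons j r ih2 => simp [List.foldl_cons, ih2]
    | some s =>
      simp [List.foldl_cons, hg, List.mapM_cons, ih (t ++ s)]
      cases rest.mapM (fun i => PySem.List.pyGet? col i) <;> simp

-- sorted list: getD is monotone on in-range indices
lemma getD_mono (sk : List String) (hs : sk.Pairwise (· ≤ ·)) {i j : Nat}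
    (hij : i ≤ j) (hj : j < sk.length) : sk.getD i "" ≤ sk.getD j "" := by
  rcases Nat.lt_or_ge i j with h | h
  · have := List.pairwise_iff_getElem.mp hs i j (Nat.lt_trans h hj) hj h
    rwa [List.getD_eq_getElem sk _ (Nat.lt_trans h hj), List.getD_eq_getElem sk _ hj]
  · have : i = j := Nat.le_antisymm hij h
    subst this; exact le_refl _

-- the while-loop computes the lower-bound position of `key` in a sorted list
lemma bsearch_spec (sk : List String) (key : String) (hs : sk.Pairwise (· ≤ ·)) :
    ∀ (fuel lo hi : Nat), hi - lo ≤ fuel → lo ≤ hi → hi ≤ sk.length →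
    (∀ j, j < lo → sk.getD j "" < key) →
    (∀ j, hi ≤ j → j < sk.length → ¬ sk.getD j "" < key) →
    bsearch sk key lo hi ≤ sk.length ∧
    (∀ j, j < bsearch sk key lo hi → sk.getD j "" < key) ∧
    (∀ j, bsearch sk key lo hi ≤ j → j < sk.length → ¬ sk.getD j "" < key) := by
  intro fuel
  induction fuel with
  | zero =>
    intro lo hi hf hlh hhl hlt hge
    rw [bsearch]
    have hlo : ¬ lo < hi := by omega
    simp only [hlo, dite_false]
    exact ⟨by omega, hlt, fun j hj hjl => hge j (by omega) hjl⟩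
  | succ n ih =>
    intro lo hi hf hlh hhl hlt hge
    rw [bsearch]
    by_cases h : lo < hi
    · simp only [h, dite_true]
      by_cases hm : sk.getD ((lo + hi) / 2) "" < key
      · simp only [hm, if_true]
        refine ih ((lo + hi) / 2 + 1) hi (by omega) (by omega) hhl ?_ hge
        intro j hj
        rcases Nat.lt_or_ge j lo with hjl | hjl
        · exact hlt j hjl
        · exact lt_of_le_of_lt (getD_mono sk hs (by omega) (by omega)) hm
      · simp only [hm, if_false]
        refine ih lo ((lo + hi) / 2) (by omega) (by omega) (by omega) hlt ?_
        intro j hj hjl hcon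
        exact hm (lt_of_le_of_lt (getD_mono sk hs hj hjl) hcon)
    · simp only [h, dite_false]
      exact ⟨by omega, hlt, fun j hj hjl => hge j (by omega) hjl⟩

-- the duplicate test of B decides membership in the sorted key list
lemma bfound_iff (sk : List String) (key : String) (hs : sk.Pairwise (· < ·)) :
    (decide (bsearch sk key 0 sk.length < sk.length) && (sk.getD (bsearch sk key 0 sk.length) "" == key)) = true
      ↔ key ∈ sk := by
  have hle : sk.Pairwise (· ≤ ·) := hs.imp (fun h => le_of_lt h)
  obtain ⟨h1, h2, h3⟩ := bsearch_spec sk key hle sk.length 0 sk.length (by omega) (by omega) (le_refl _)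
    (by intro j hj; omega) (by intro j hj hjl; omega)
  set r := bsearch sk key 0 sk.length with hr
  constructor
  · intro h
    simp only [Bool.and_eq_true, decide_eq_true_eq, beq_iff_eq] at h
    obtain ⟨hrl, hrk⟩ := h
    rw [List.getD_eq_getElem sk _ hrl] at hrk
    exact hrk ▸ List.getElem_mem hrl
  · intro hmem
    obtain ⟨j, hj, hjk⟩ := List.mem_iff_getElem.mp hmem
    have hjr : r ≤ j := by
      by_contra hcon
      have := h2 j (by omega)
      rw [List.getD_eq_getElem sk _ hj] at this
      exact absurd (hjk ▸ this) (lt_irrefl key)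
    have hrl : r < sk.length := lt_of_le_of_lt hjr hj
    have hub : sk.getD r "" ≤ key := by
      have := getD_mono sk hle hjr hj
      rwa [List.getD_eq_getElem sk _ hj, hjk] at this
    have hlb : ¬ sk.getD r "" < key := h3 r (le_refl _) hrl
    have heq : sk.getD r "" = key := le_antisymm hub (not_lt.mp hlb)
    rw [List.getD_eq_getElem sk _ hrl] at heq
    simp [hrl, heq]

-- inserting a fresh key at its lower-bound position keeps the list strictly sorted
lemma insert_sorted (sk : List String) (key : String) (r : Nat)
    (hs : sk.Pairwise (· < ·)) (hrl : r ≤ sk.length)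
    (hlt : ∀ j, j < r → sk.getD j "" < key)
    (hge : ∀ j, r ≤ j → j < sk.length → ¬ sk.getD j "" < key)
    (hnm : key ∉ sk) :
    (sk.take r ++ key :: sk.drop r).Pairwise (· < ·) := by
  rw [List.pairwise_append]
  refine ⟨List.Pairwise.sublist (List.take_sublist r sk) hs, ?_, ?_⟩
  · rw [List.pairwise_cons]
    refine ⟨?_, List.Pairwise.sublist (List.drop_sublist r sk) hs⟩
    intro b hb
    obtain ⟨i, hi, hib⟩ := List.mem_iff_getElem.mp hb
    rw [List.getElem_drop] at hib
    have hbm : b ∈ sk := by rw [← hib]; exact List.getElem_mem _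
    have hlen : r + i < sk.length := by
      have := hi; rw [List.length_drop] at this; omega
    have hkb : ¬ sk.getD (r + i) "" < key := hge (r + i) (by omega) hlen
    rw [List.getD_eq_getElem sk _ hlen, hib] at hkb
    rcases lt_or_eq_of_le (not_lt.mp hkb) with h | h
    · exact h
    · exact absurd (h ▸ hbm) hnm
  · intro a ha b hb
    obtain ⟨i, hi, hia⟩ := List.mem_iff_getElem.mp ha
    have hir : i < r := by
      have := hi; rw [List.length_take] at this; omega
    rw [List.getElem_take] at hia
    have hak : a < key := by
      have := hlt i hir
      rwa [List.getD_eq_getElem sk _ (by omega), hia] at this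
    rcases List.mem_cons.mp hb with rfl | hbd
    · exact hak
    · obtain ⟨j, hj, hjb⟩ := List.mem_iff_getElem.mp hbd
      rw [List.getElem_drop] at hjb
      have hlen : r + j < sk.length := by
        have := hj; rw [List.length_drop] at this; omega
      have hkb : ¬ sk.getD (r + j) "" < key := hge (r + j) (by omega) hlen
      rw [List.getD_eq_getElem sk _ hlen, hjb] at hkb
      exact lt_of_lt_of_le hak (not_lt.mp hkb)

-- the two row loops agree whenever the running set and the sorted list hold the same keys
lemma loops_eq (comb : List Int) :
    ∀ (relation : List (List String)) (check : PySem.Set String) (sk : List String),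
    sk.Pairwise (· < ·) → (∀ x, x ∈ check ↔ x ∈ sk) →
    aLoop comb relation check = bLoop comb relation sk := by
  intro relation
  induction relation with
  | nil => intro check sk _ _; rfl
  | cons col rest ih =>
    intro check sk hs hmem
    rw [aLoop, bLoop, buildTemp_eq_joinKey]
    cases hk : joinKey col comb with
    | none => rfl
    | some key =>
      have hfound := bfound_iff sk key hs
      set r := bsearch sk key 0 sk.length with hrdef
      by_cases hin : key ∈ sk
      · have hc : PySem.Set.contains check key = true := by
          rw [PySem.Set.contains_iff]; exact (hmem key).mpr hin
        have hf : (decide (r < sk.length) && (sk.getD r "" == key)) = true := hfound.mpr hin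
        simp only [hc, if_true]
        rw [if_pos]
        simpa using hf
      · have hc : PySem.Set.contains check key = false := by
          rw [← Bool.not_eq_true, PySem.Set.contains_iff]
          intro h; exact hin ((hmem key).mp h)
        have hf : ¬ ((decide (r < sk.length) && (sk.getD r "" == key)) = true) := fun h => hin (hfound.mp h)
        simp only [hc, Bool.false_eq_true, if_false]
        rw [if_neg (by simpa using hf)]
        have hle : sk.Pairwise (· ≤ ·) := hs.imp (fun h => le_of_lt h)
        obtain ⟨h1, h2, h3⟩ := bsearch_spec sk key hle sk.length 0 sk.length (by omega) (by omega)
          (le_refl _) (by intro j hj; omega) (by intro j hj hjl; omega)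
        rw [PySem.List.insert_natCast sk r key h1]
        refine ih (PySem.Set.add check key) _ (insert_sorted sk key r hs h1 h2 h3 hin) ?_
        intro x
        rw [PySem.Set.mem_add, List.mem_append, List.mem_cons]
        constructor
        · rintro (hx | rfl)
          · have hxs : x ∈ sk := (hmem x).mp hx
            rw [← List.take_append_drop r sk] at hxs
            rcases List.mem_append.mp hxs with h | h
            · exact Or.inl h
            · exact Or.inr (Or.inr h)
          · exact Or.inr (Or.inl rfl)
        · rintro (hx | rfl | hx)
          · exact Or.inl ((hmem x).mpr (List.mem_of_mem_take hx))
          · exact Or.inr rfl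
          · exact Or.inl ((hmem x).mpr (List.mem_of_mem_drop hx))

-- ===== VERDICT (by name: the statement is the Claim_ definition above) =====
theorem check_tuple_spec : Claim_equal_check_tuple := by
  intro relation comb _hdom _hpre
  unfold Spec_check_tuple check_tuple check_tuple_alt
  exact loops_eq comb relation PySem.Set.empty [] (by simp) (by intro x; simp [PySem.Set.empty])
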